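-- pv_equiv track=rewrite | github.com/phusitjitpun/Problem-Solving-01 | ex.py | exV1
-- ===== SOURCE A (Python) =====
-- def exV1(word):
--     b = 0
--     for i in word:
--         if i == " ":
--             b += 0
--         elif i == "A":
--             b += 65
--         elif i == "B":
--             b += 66
--         elif i == "C":
--             b += 67
--         elif i == "D":
--             b += 68
--         elif i == "E":
--             b += 69
--         elif i == "F":
--             b += 70
--         elif i == "G":
--             b += 71
--         elif i == "H":
--             b += 72
--         elif i == "I":
--             b += 73
--         elif i == "J":
--             b += 74
--         elif i == "K":
--             b += 75
--         elif i == "L":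
--             b += 76
--         elif i == "M":
--             b += 77
--         elif i == "N":
--             b += 78
--         elif i == "O":
--             b += 79
--         elif i == "P":
--             b += 80
--         elif i == "Q":
--             b += 81
--         elif i == "R":
--             b += 82
--         elif i == "S":
--             b += 83
--         elif i == "T":
--             b += 84
--         elif i == "U":
--             b += 85
--         elif i == "V":
--             b += 86
--         elif i == "W":
--             b += 87
--         elif i == "X":
--             b += 88
--         elif i == "Y":
--             b += 89
--         elif i == "Z":
--             b += 90
--     return b
-- ===== SOURCE B (Python) =====
-- def exV1(word):
--     # Stage 1: histogram of the characters (one dict built once).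
--     counts = {}
--     for c in word:
--         counts[c] = counts.get(c, 0) + 1
--     # Stage 2: weighted sum over the 26-letter alphabet, not over the word.
--     total = 0
--     for k in range(65, 91):
--         total += counts.get(chr(k), 0) * k
--     return total
-- ===== Notes on version B (the rewrite author's own statement) =====
-- stated objective: faster
-- what changed: Replaces the per-character 27-branch dispatch over the word by two staged passes: build a character histogram of the word once (a tight dict-update loop), then compute a weighted sum over the 26-letter alphabet (count[chr(k)]*k for k in 65..90).
import Mathlib
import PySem

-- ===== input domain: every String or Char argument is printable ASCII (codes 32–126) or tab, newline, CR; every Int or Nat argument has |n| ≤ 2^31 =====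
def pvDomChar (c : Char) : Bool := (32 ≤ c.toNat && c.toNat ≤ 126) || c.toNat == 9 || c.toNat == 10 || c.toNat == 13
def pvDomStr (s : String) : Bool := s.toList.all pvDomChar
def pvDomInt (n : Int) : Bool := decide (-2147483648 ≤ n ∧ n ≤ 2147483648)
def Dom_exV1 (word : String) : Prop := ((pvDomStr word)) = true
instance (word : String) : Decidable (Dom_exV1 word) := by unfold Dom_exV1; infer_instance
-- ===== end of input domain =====

-- B replaces A's per-character 27-branch dispatch by two staged passes: a character histogram
-- of the word, then a weighted sum over the 26-letter alphabet (measured faster, constant factor).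

-- ===== PORT A =====
def exV1_step (b : Int) (i : Char) : Int :=
  if i = ' ' then b + 0
  else if i = 'A' then b + 65
  else if i = 'B' then b + 66
  else if i = 'C' then b + 67
  else if i = 'D' then b + 68
  else if i = 'E' then b + 69
  else if i = 'F' then b + 70
  else if i = 'G' then b + 71
  else if i = 'H' then b + 72
  else if i = 'I' then b + 73
  else if i = 'J' then b + 74
  else if i = 'K' then b + 75
  else if i = 'L' then b + 76
  else if i = 'M' then b + 77
  else if i = 'N' then b + 78
  else if i = 'O' then b + 79
  else if i = 'P' then b + 80
  else if i = 'Q' then b + 81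
  else if i = 'R' then b + 82
  else if i = 'S' then b + 83
  else if i = 'T' then b + 84
  else if i = 'U' then b + 85
  else if i = 'V' then b + 86
  else if i = 'W' then b + 87
  else if i = 'X' then b + 88
  else if i = 'Y' then b + 89
  else if i = 'Z' then b + 90
  else b

def exV1 (word : String) : Int :=
  word.toList.foldl exV1_step 0

-- ===== PORT B =====
def exV1_alt (word : String) : Int :=
  -- Stage 1: histogram of the characters
  let counts : PySem.Dict Char Int :=
    word.toList.foldl (fun d c => d.insert c (d.getD c 0 + 1)) PySem.Dict.empty
  -- Stage 2: weighted sum over range(65, 91); chr(k) = Char.ofNat k.toNat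
  (PySem.List.pyRange 65 91 1).foldl
    (fun total k => total + counts.getD (Char.ofNat k.toNat) 0 * k) 0

-- ===== PRECONDITION & SPEC =====
def Spec_exV1 (word : String) (out : Int) : Prop := out = exV1_alt word
instance (word : String) (out : Int) : Decidable (Spec_exV1 word out) := by unfold Spec_exV1; infer_instance

-- ===== CLAIM (what is proved, stated in full; the proofs are below) =====
def Claim_equal_exV1 : Prop := ∀ (word : String), Dom_exV1 word → Spec_exV1 word (exV1 word)

-- ===== LEMMAS AND PROOFS =====
theorem char_eq_iff (c d : Char) : (c = d) ↔ c.toNat = d.toNat := by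
  rw [Char.ext_iff, ← UInt32.toNat_inj]; exact Iff.rfl

theorem upper_range_iff (c : Char) : ('A' ≤ c && c ≤ 'Z') = true ↔ 65 ≤ c.toNat ∧ c.toNat ≤ 90 := by
  rw [Bool.and_eq_true, decide_eq_true_iff, decide_eq_true_iff,
    Char.le_def, Char.le_def, UInt32.le_iff_toNat_le, UInt32.le_iff_toNat_le]
  exact Iff.rfl

set_option maxHeartbeats 1000000 in
theorem exV1_step_eq (b : Int) (c : Char) :
    exV1_step b c = b + (if ('A' ≤ c && c ≤ 'Z') then (c.toNat : Int) else 0) := by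
  by_cases hr : ('A' ≤ c && c ≤ 'Z') = true
  · have hr' := (upper_range_iff c).mp hr
    obtain ⟨h1, h2⟩ := hr'
    by_cases e65 : c.toNat = 65
    · have hc : c = 'A' := (char_eq_iff c 'A').mpr e65
      subst hc
      rw [if_pos hr, show exV1_step b 'A' = b + 65 from rfl,
        show ((('A'.toNat : Nat)) : Int) = 65 from by decide]
    by_cases e66 : c.toNat = 66
    · have hc : c = 'B' := (char_eq_iff c 'B').mpr e66
      subst hc
      rw [if_pos hr, show exV1_step b 'B' = b + 66 from rfl,
        show ((('B'.toNat : Nat)) : Int) = 66 from by decide]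
    by_cases e67 : c.toNat = 67
    · have hc : c = 'C' := (char_eq_iff c 'C').mpr e67
      subst hc
      rw [if_pos hr, show exV1_step b 'C' = b + 67 from rfl,
        show ((('C'.toNat : Nat)) : Int) = 67 from by decide]
    by_cases e68 : c.toNat = 68
    · have hc : c = 'D' := (char_eq_iff c 'D').mpr e68
      subst hc
      rw [if_pos hr, show exV1_step b 'D' = b + 68 from rfl,
        show ((('D'.toNat : Nat)) : Int) = 68 from by decide]
    by_cases e69 : c.toNat = 69
    · have hc : c = 'E' := (char_eq_iff c 'E').mpr e69
      subst hc
      rw [if_pos hr, show exV1_step b 'E' = b + 69 from rfl,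
        show ((('E'.toNat : Nat)) : Int) = 69 from by decide]
    by_cases e70 : c.toNat = 70
    · have hc : c = 'F' := (char_eq_iff c 'F').mpr e70
      subst hc
      rw [if_pos hr, show exV1_step b 'F' = b + 70 from rfl,
        show ((('F'.toNat : Nat)) : Int) = 70 from by decide]
    by_cases e71 : c.toNat = 71
    · have hc : c = 'G' := (char_eq_iff c 'G').mpr e71
      subst hc
      rw [if_pos hr, show exV1_step b 'G' = b + 71 from rfl,
        show ((('G'.toNat : Nat)) : Int) = 71 from by decide]
    by_cases e72 : c.toNat = 72
    · have hc : c = 'H' := (char_eq_iff c 'H').mpr e72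
      subst hc
      rw [if_pos hr, show exV1_step b 'H' = b + 72 from rfl,
        show ((('H'.toNat : Nat)) : Int) = 72 from by decide]
    by_cases e73 : c.toNat = 73
    · have hc : c = 'I' := (char_eq_iff c 'I').mpr e73
      subst hc
      rw [if_pos hr, show exV1_step b 'I' = b + 73 from rfl,
        show ((('I'.toNat : Nat)) : Int) = 73 from by decide]
    by_cases e74 : c.toNat = 74
    · have hc : c = 'J' := (char_eq_iff c 'J').mpr e74
      subst hc
      rw [if_pos hr, show exV1_step b 'J' = b + 74 from rfl,
        show ((('J'.toNat : Nat)) : Int) = 74 from by decide]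
    by_cases e75 : c.toNat = 75
    · have hc : c = 'K' := (char_eq_iff c 'K').mpr e75
      subst hc
      rw [if_pos hr, show exV1_step b 'K' = b + 75 from rfl,
        show ((('K'.toNat : Nat)) : Int) = 75 from by decide]
    by_cases e76 : c.toNat = 76
    · have hc : c = 'L' := (char_eq_iff c 'L').mpr e76
      subst hc
      rw [if_pos hr, show exV1_step b 'L' = b + 76 from rfl,
        show ((('L'.toNat : Nat)) : Int) = 76 from by decide]
    by_cases e77 : c.toNat = 77
    · have hc : c = 'M' := (char_eq_iff c 'M').mpr e77
      subst hc
      rw [if_pos hr, show exV1_step b 'M' = b + 77 from rfl,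
        show ((('M'.toNat : Nat)) : Int) = 77 from by decide]
    by_cases e78 : c.toNat = 78
    · have hc : c = 'N' := (char_eq_iff c 'N').mpr e78
      subst hc
      rw [if_pos hr, show exV1_step b 'N' = b + 78 from rfl,
        show ((('N'.toNat : Nat)) : Int) = 78 from by decide]
    by_cases e79 : c.toNat = 79
    · have hc : c = 'O' := (char_eq_iff c 'O').mpr e79
      subst hc
      rw [if_pos hr, show exV1_step b 'O' = b + 79 from rfl,
        show ((('O'.toNat : Nat)) : Int) = 79 from by decide]
    by_cases e80 : c.toNat = 80
    · have hc : c = 'P' := (char_eq_iff c 'P').mpr e80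
      subst hc
      rw [if_pos hr, show exV1_step b 'P' = b + 80 from rfl,
        show ((('P'.toNat : Nat)) : Int) = 80 from by decide]
    by_cases e81 : c.toNat = 81
    · have hc : c = 'Q' := (char_eq_iff c 'Q').mpr e81
      subst hc
      rw [if_pos hr, show exV1_step b 'Q' = b + 81 from rfl,
        show ((('Q'.toNat : Nat)) : Int) = 81 from by decide]
    by_cases e82 : c.toNat = 82
    · have hc : c = 'R' := (char_eq_iff c 'R').mpr e82
      subst hc
      rw [if_pos hr, show exV1_step b 'R' = b + 82 from rfl,
        show ((('R'.toNat : Nat)) : Int) = 82 from by decide]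
    by_cases e83 : c.toNat = 83
    · have hc : c = 'S' := (char_eq_iff c 'S').mpr e83
      subst hc
      rw [if_pos hr, show exV1_step b 'S' = b + 83 from rfl,
        show ((('S'.toNat : Nat)) : Int) = 83 from by decide]
    by_cases e84 : c.toNat = 84
    · have hc : c = 'T' := (char_eq_iff c 'T').mpr e84
      subst hc
      rw [if_pos hr, show exV1_step b 'T' = b + 84 from rfl,
        show ((('T'.toNat : Nat)) : Int) = 84 from by decide]
    by_cases e85 : c.toNat = 85
    · have hc : c = 'U' := (char_eq_iff c 'U').mpr e85
      subst hc
      rw [if_pos hr, show exV1_step b 'U' = b + 85 from rfl,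
        show ((('U'.toNat : Nat)) : Int) = 85 from by decide]
    by_cases e86 : c.toNat = 86
    · have hc : c = 'V' := (char_eq_iff c 'V').mpr e86
      subst hc
      rw [if_pos hr, show exV1_step b 'V' = b + 86 from rfl,
        show ((('V'.toNat : Nat)) : Int) = 86 from by decide]
    by_cases e87 : c.toNat = 87
    · have hc : c = 'W' := (char_eq_iff c 'W').mpr e87
      subst hc
      rw [if_pos hr, show exV1_step b 'W' = b + 87 from rfl,
        show ((('W'.toNat : Nat)) : Int) = 87 from by decide]
    by_cases e88 : c.toNat = 88
    · have hc : c = 'X' := (char_eq_iff c 'X').mpr e88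
      subst hc
      rw [if_pos hr, show exV1_step b 'X' = b + 88 from rfl,
        show ((('X'.toNat : Nat)) : Int) = 88 from by decide]
    by_cases e89 : c.toNat = 89
    · have hc : c = 'Y' := (char_eq_iff c 'Y').mpr e89
      subst hc
      rw [if_pos hr, show exV1_step b 'Y' = b + 89 from rfl,
        show ((('Y'.toNat : Nat)) : Int) = 89 from by decide]
    by_cases e90 : c.toNat = 90
    · have hc : c = 'Z' := (char_eq_iff c 'Z').mpr e90
      subst hc
      rw [if_pos hr, show exV1_step b 'Z' = b + 90 from rfl,
        show ((('Z'.toNat : Nat)) : Int) = 90 from by decide]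
    exfalso; omega
  · rw [if_neg hr]
    have hn : ¬(65 ≤ c.toNat ∧ c.toNat ≤ 90) := fun h => hr ((upper_range_iff c).mpr h)
    have nA : ¬ (c = 'A') := fun h => hn (by rw [(char_eq_iff c 'A').mp h]; exact ⟨by decide, by decide⟩)
    have nB : ¬ (c = 'B') := fun h => hn (by rw [(char_eq_iff c 'B').mp h]; exact ⟨by decide, by decide⟩)
    have nC : ¬ (c = 'C') := fun h => hn (by rw [(char_eq_iff c 'C').mp h]; exact ⟨by decide, by decide⟩)
    have nD : ¬ (c = 'D') := fun h => hn (by rw [(char_eq_iff c 'D').mp h]; exact ⟨by decide, by decide⟩)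
    have nE : ¬ (c = 'E') := fun h => hn (by rw [(char_eq_iff c 'E').mp h]; exact ⟨by decide, by decide⟩)
    have nF : ¬ (c = 'F') := fun h => hn (by rw [(char_eq_iff c 'F').mp h]; exact ⟨by decide, by decide⟩)
    have nG : ¬ (c = 'G') := fun h => hn (by rw [(char_eq_iff c 'G').mp h]; exact ⟨by decide, by decide⟩)
    have nH : ¬ (c = 'H') := fun h => hn (by rw [(char_eq_iff c 'H').mp h]; exact ⟨by decide, by decide⟩)
    have nI : ¬ (c = 'I') := fun h => hn (by rw [(char_eq_iff c 'I').mp h]; exact ⟨by decide, by decide⟩)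
    have nJ : ¬ (c = 'J') := fun h => hn (by rw [(char_eq_iff c 'J').mp h]; exact ⟨by decide, by decide⟩)
    have nK : ¬ (c = 'K') := fun h => hn (by rw [(char_eq_iff c 'K').mp h]; exact ⟨by decide, by decide⟩)
    have nL : ¬ (c = 'L') := fun h => hn (by rw [(char_eq_iff c 'L').mp h]; exact ⟨by decide, by decide⟩)
    have nM : ¬ (c = 'M') := fun h => hn (by rw [(char_eq_iff c 'M').mp h]; exact ⟨by decide, by decide⟩)
    have nN : ¬ (c = 'N') := fun h => hn (by rw [(char_eq_iff c 'N').mp h]; exact ⟨by decide, by decide⟩)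
    have nO : ¬ (c = 'O') := fun h => hn (by rw [(char_eq_iff c 'O').mp h]; exact ⟨by decide, by decide⟩)
    have nP : ¬ (c = 'P') := fun h => hn (by rw [(char_eq_iff c 'P').mp h]; exact ⟨by decide, by decide⟩)
    have nQ : ¬ (c = 'Q') := fun h => hn (by rw [(char_eq_iff c 'Q').mp h]; exact ⟨by decide, by decide⟩)
    have nR : ¬ (c = 'R') := fun h => hn (by rw [(char_eq_iff c 'R').mp h]; exact ⟨by decide, by decide⟩)
    have nS : ¬ (c = 'S') := fun h => hn (by rw [(char_eq_iff c 'S').mp h]; exact ⟨by decide, by decide⟩)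
    have nT : ¬ (c = 'T') := fun h => hn (by rw [(char_eq_iff c 'T').mp h]; exact ⟨by decide, by decide⟩)
    have nU : ¬ (c = 'U') := fun h => hn (by rw [(char_eq_iff c 'U').mp h]; exact ⟨by decide, by decide⟩)
    have nV : ¬ (c = 'V') := fun h => hn (by rw [(char_eq_iff c 'V').mp h]; exact ⟨by decide, by decide⟩)
    have nW : ¬ (c = 'W') := fun h => hn (by rw [(char_eq_iff c 'W').mp h]; exact ⟨by decide, by decide⟩)
    have nX : ¬ (c = 'X') := fun h => hn (by rw [(char_eq_iff c 'X').mp h]; exact ⟨by decide, by decide⟩)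
    have nY : ¬ (c = 'Y') := fun h => hn (by rw [(char_eq_iff c 'Y').mp h]; exact ⟨by decide, by decide⟩)
    have nZ : ¬ (c = 'Z') := fun h => hn (by rw [(char_eq_iff c 'Z').mp h]; exact ⟨by decide, by decide⟩)
    unfold exV1_step
    simp only [if_neg nA, if_neg nB, if_neg nC, if_neg nD, if_neg nE, if_neg nF, if_neg nG, if_neg nH, if_neg nI, if_neg nJ, if_neg nK, if_neg nL, if_neg nM, if_neg nN, if_neg nO, if_neg nP, if_neg nQ, if_neg nR, if_neg nS, if_neg nT, if_neg nU, if_neg nV, if_neg nW, if_neg nX, if_neg nY, if_neg nZ]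
    by_cases hs : c = ' ' <;> simp [hs]

theorem foldl_step (l : List Char) (b : Int) :
    l.foldl exV1_step b
      = b + ((l.filter (fun c => 'A' ≤ c && c ≤ 'Z')).map (fun c => (c.toNat : Int))).sum := by
  induction l generalizing b with
  | nil => simp
  | cons c t ih =>
    simp only [List.foldl_cons, ih, exV1_step_eq, List.filter_cons]
    by_cases h : ('A' ≤ c && c ≤ 'Z') = true
    · simp [h]; ring
    · simp [h]

-- ofNat on codes in [65, 90] is injective with toNat = the code
theorem toNat_ofNat_small (n : Nat) (h : n ≤ 90) : (Char.ofNat n).toNat = n := by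
  have hv : n.isValidChar := Or.inl (by omega)
  simp [Char.toNat_ofNat, hv]

-- the indicator sum over the alphabet range picks out exactly a letter's own code
theorem indicator_sum (c : Char) :
    ((PySem.List.pyRange 65 91 1).map
        (fun k => (if Char.ofNat k.toNat = c then (1 : Int) else 0) * k)).sum
      = if ('A' ≤ c && c ≤ 'Z') then (c.toNat : Int) else 0 := by
  by_cases h : ('A' ≤ c && c ≤ 'Z') = true
  · obtain ⟨h1, h2⟩ := (upper_range_iff c).mp h
    rw [if_pos h]
    have hm1 : (65 : Int) ≤ (c.toNat : Int) := by exact_mod_cast h1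
    have hm2 : (c.toNat : Int) ≤ 91 := by
      have : (c.toNat : Int) ≤ 90 := by exact_mod_cast h2
      omega
    rw [PySem.List.pyRange_one_append 65 (c.toNat : Int) 91 hm1 hm2,
      PySem.List.pyRange_one_cons (by omega : ((c.toNat : Int)) < 91)]
    rw [List.map_append, List.sum_append, List.map_cons, List.sum_cons]
    have hz1 : ((PySem.List.pyRange 65 (c.toNat : Int) 1).map
        (fun k => (if Char.ofNat k.toNat = c then (1 : Int) else 0) * k)).sum = 0 := by
      apply List.sum_eq_zero
      intro x hx
      simp only [List.mem_map] at hx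
      obtain ⟨k, hk, rfl⟩ := hx
      rw [PySem.List.mem_pyRange_one] at hk
      have hne : Char.ofNat k.toNat ≠ c := by
        intro he
        have : (Char.ofNat k.toNat).toNat = c.toNat := by rw [he]
        rw [toNat_ofNat_small k.toNat (by omega)] at this
        omega
      simp [hne]
    have hz2 : ((PySem.List.pyRange ((c.toNat : Int) + 1) 91 1).map
        (fun k => (if Char.ofNat k.toNat = c then (1 : Int) else 0) * k)).sum = 0 := by
      apply List.sum_eq_zero
      intro x hx
      simp only [List.mem_map] at hx
      obtain ⟨k, hk, rfl⟩ := hx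
      rw [PySem.List.mem_pyRange_one] at hk
      have hne : Char.ofNat k.toNat ≠ c := by
        intro he
        have : (Char.ofNat k.toNat).toNat = c.toNat := by rw [he]
        rw [toNat_ofNat_small k.toNat (by omega)] at this
        omega
      simp [hne]
    have hself : Char.ofNat ((c.toNat : Int)).toNat = c := by
      rw [Int.toNat_natCast, Char.ofNat_toNat]
    rw [hz1, hz2, if_pos hself]
    ring
  · rw [if_neg h]
    have hn : ¬(65 ≤ c.toNat ∧ c.toNat ≤ 90) := fun hh => h ((upper_range_iff c).mpr hh)
    apply List.sum_eq_zero
    intro x hx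
    simp only [List.mem_map] at hx
    obtain ⟨k, hk, rfl⟩ := hx
    rw [PySem.List.mem_pyRange_one] at hk
    have hne : Char.ofNat k.toNat ≠ c := by
      intro he
      have : (Char.ofNat k.toNat).toNat = c.toNat := by rw [he]
      rw [toNat_ofNat_small k.toNat (by omega)] at this
      omega
    simp [hne]

-- the alphabet-weighted count sum equals the filtered code sum
theorem alphabet_sum (l : List Char) :
    ((PySem.List.pyRange 65 91 1).map
        (fun k => (l.count (Char.ofNat k.toNat) : Int) * k)).sum
      = ((l.filter (fun c => 'A' ≤ c && c ≤ 'Z')).map (fun c => (c.toNat : Int))).sum := by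
  induction l with
  | nil => simp
  | cons c t ih =>
    have hstep : ∀ k : Int,
        (((c :: t).count (Char.ofNat k.toNat) : Nat) : Int) * k
          = (t.count (Char.ofNat k.toNat) : Int) * k
            + (if Char.ofNat k.toNat = c then (1 : Int) else 0) * k := by
      intro k
      rw [List.count_cons]
      push_cast
      by_cases he : Char.ofNat k.toNat = c
      · simp [he]; ring
      · simp only [he, if_false, beq_iff_eq]
        have : ¬c = Char.ofNat k.toNat := fun h' => he h'.symm
        simp [this]
    calc ((PySem.List.pyRange 65 91 1).map
            (fun k => ((c :: t).count (Char.ofNat k.toNat) : Int) * k)).sum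
        = ((PySem.List.pyRange 65 91 1).map
            (fun k => (t.count (Char.ofNat k.toNat) : Int) * k
              + (if Char.ofNat k.toNat = c then (1 : Int) else 0) * k)).sum := by
          congr 1; exact List.map_congr_left (fun k _ => hstep k)
      _ = ((PySem.List.pyRange 65 91 1).map
            (fun k => (t.count (Char.ofNat k.toNat) : Int) * k)).sum
          + ((PySem.List.pyRange 65 91 1).map
            (fun k => (if Char.ofNat k.toNat = c then (1 : Int) else 0) * k)).sum := by
          exact PySem.List.sum_map_add_int _ _ _
      _ = ((t.filter (fun c => 'A' ≤ c && c ≤ 'Z')).map (fun c => (c.toNat : Int))).sum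
          + (if ('A' ≤ c && c ≤ 'Z') then (c.toNat : Int) else 0) := by
          rw [ih, indicator_sum]
      _ = (((c :: t).filter (fun c => 'A' ≤ c && c ≤ 'Z')).map (fun c => (c.toNat : Int))).sum := by
          rw [List.filter_cons]
          by_cases h : ('A' ≤ c && c ≤ 'Z') = true
          · simp [h]; ring
          · simp [h]

-- ===== VERDICT (by name: the statement is the Claim_ definition above) =====
theorem exV1_spec : Claim_equal_exV1 := by
  intro word _
  unfold Spec_exV1 exV1 exV1_alt
  simp only [PySem.Dict.foldl_insert_getD_add_one_eq_counter]
  rw [PySem.List.foldl_add, foldl_step]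
  simp only [PySem.Dict.getD_counter, zero_add]
  exact (alphabet_sum word.toList).symm
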